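-- pv_equiv track=rewrite | github.com/kprights/hmbench | benchmark_runner.py | normalize_trace_entries
-- ===== SOURCE A (Python) =====
-- from collections import Counter, defaultdict
--
-- def normalize_trace_entries(entries):
--     counts = Counter(entries)
--     seen = Counter()
--     normalized = []
--
--     for entry in entries:
--         seen[entry] += 1
--         if counts[entry] > 1:
--             normalized.append(f"{entry}#{seen[entry]}")
--         else:
--             normalized.append(entry)
--
--     return normalized
-- ===== SOURCE B (Python) =====
-- from collections import defaultdict
--
-- def normalize_trace_entries(entries):
--     positions = defaultdict(list)
--     for i, entry in enumerate(entries):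
--         positions[entry].append(i)
--
--     result = [""] * len(entries)
--     for entry, idxs in positions.items():
--         if len(idxs) == 1:
--             result[idxs[0]] = entry
--         else:
--             for k, p in enumerate(idxs):
--                 result[p] = f"{entry}#{k + 1}"
--     return result
-- ===== Notes on version B (the rewrite author's own statement) =====
-- stated objective: alternative
-- what changed: A counts duplicates and relabels in a single forward pass with a running 'seen' counter; B first builds a dict mapping each entry to the list of its positions, then scatters plain or '#k'-suffixed names back into a preallocated result by position.
import Mathlib
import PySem

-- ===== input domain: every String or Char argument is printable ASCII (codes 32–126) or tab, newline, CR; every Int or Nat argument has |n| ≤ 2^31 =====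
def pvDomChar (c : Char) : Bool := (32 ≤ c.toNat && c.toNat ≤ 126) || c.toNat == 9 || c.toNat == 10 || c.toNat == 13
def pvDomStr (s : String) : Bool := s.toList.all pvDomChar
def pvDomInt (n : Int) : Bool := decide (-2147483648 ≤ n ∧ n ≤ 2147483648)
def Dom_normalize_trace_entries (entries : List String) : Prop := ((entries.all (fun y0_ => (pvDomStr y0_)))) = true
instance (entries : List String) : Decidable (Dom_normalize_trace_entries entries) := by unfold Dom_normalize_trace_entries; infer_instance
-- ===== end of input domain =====

-- B replaces A's forward counting pass (total counts + running 'seen' counter) by a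
-- group-and-scatter decomposition: index every entry's positions in one pass, then write the
-- plain or '#k'-suffixed name back at each position (objective: alternative, same cost).

-- ===== PORT A =====
def normalize_trace_entries (entries : List String) : List String :=
  let counts := PySem.Dict.counter entries
  (entries.foldl
    (fun (st : PySem.Dict String Int × List String) entry =>
      let seen := st.1.modify entry 0 (· + 1)
      (seen,
        if 1 < counts.getD entry 0 then
          st.2 ++ [entry ++ "#" ++ PySem.Int.toStr (seen.getD entry 0)]
        else
          st.2 ++ [entry]))
    (PySem.Dict.empty, [])).2

-- ===== PORT B =====
-- literal transliteration of Source B: positions dict built over enumerate, then a scatter pass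
-- over its groups ("" plays [None]*n's placeholder role: every slot is overwritten)
def normalize_trace_entries_alt (entries : List String) : List String :=
  let positions : PySem.Dict String (List Int) :=
    (PySem.List.enumerate entries 0).foldl
      (fun d pr => d.modify pr.2 ([] : List Int) (· ++ [pr.1])) PySem.Dict.empty
  positions.items.foldl
    (fun result pr =>
      if pr.2.length == 1 then
        PySem.List.pySetD result (pr.2.getD 0 0) pr.1
      else
        (PySem.List.enumerate pr.2 0).foldl
          (fun r q => PySem.List.pySetD r q.2 (pr.1 ++ "#" ++ PySem.Int.toStr (q.1 + 1))) result)
    (List.replicate entries.length "")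

-- ===== PRECONDITION & SPEC =====
def Spec_normalize_trace_entries (entries : List String) (out : List String) : Prop := out = normalize_trace_entries_alt entries
instance (entries : List String) (out : List String) : Decidable (Spec_normalize_trace_entries entries out) := by unfold Spec_normalize_trace_entries; infer_instance

-- ===== CLAIM (what is proved, stated in full; the proofs are below) =====
def Claim_equal_normalize_trace_entries : Prop := ∀ (entries : List String), Dom_normalize_trace_entries entries → Spec_normalize_trace_entries entries (normalize_trace_entries entries)

-- ===== LEMMAS AND PROOFS =====

-- the value both programs place at position j
def tagAt (xs : List String) (j : Nat) : String :=
  let e := xs.getD j ""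
  if 1 < xs.count e then e ++ "#" ++ PySem.Int.toStr (((xs.take (j+1)).count e : Nat) : Int) else e

-- positions (from offset s) at which e occurs in xs
def idxN : List String → String → Nat → List Nat
  | [], _, _ => []
  | x :: xs, e, s => if x == e then s :: idxN xs e (s+1) else idxN xs e (s+1)

theorem length_idxN (xs : List String) (e : String) (s : Nat) :
    (idxN xs e s).length = xs.count e := by
  induction xs generalizing s with
  | nil => simp [idxN]
  | cons x xs ih =>
    by_cases h : x == e <;> simp [idxN, h, ih, List.count_cons]

theorem mem_idxN (xs : List String) (e : String) (s : Nat) (i : Nat) :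
    i ∈ idxN xs e s ↔ ∃ j, j < xs.length ∧ i = s + j ∧ xs.getD j "" = e := by
  induction xs generalizing s with
  | nil => simp [idxN]
  | cons x xs ih =>
    by_cases h : x = e
    · simp only [idxN, h, beq_self_eq_true, if_true, List.mem_cons, ih]
      constructor
      · rintro (rfl | ⟨j, hj, rfl, hje⟩)
        · exact ⟨0, by simp, by omega, by simp⟩
        · exact ⟨j + 1, by simpa using hj, by omega, by simpa using hje⟩
      · rintro ⟨j, hj, rfl, hje⟩
        cases j with
        | zero => left; omega
        | succ j => right; exact ⟨j, by simpa using hj, by omega, by simpa using hje⟩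
    · simp only [idxN, beq_iff_eq, h, if_false, ih]
      constructor
      · rintro ⟨j, hj, rfl, hje⟩
        exact ⟨j + 1, by simpa using hj, by omega, by simpa using hje⟩
      · rintro ⟨j, hj, rfl, hje⟩
        cases j with
        | zero => exact absurd hje h
        | succ j => exact ⟨j, by simpa using hj, by omega, by simpa using hje⟩

theorem idxN_get (xs : List String) (e : String) (s k : Nat)
    (hk : k < (idxN xs e s).length) :
    ∃ j, j < xs.length ∧ (idxN xs e s)[k] = s + j ∧ xs.getD j "" = e ∧
      (xs.take (j+1)).count e = k + 1 := by
  induction xs generalizing s k with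
  | nil => simp [idxN] at hk
  | cons x xs ih =>
    by_cases h : x = e
    · subst h
      cases k with
      | zero => exact ⟨0, by simp, by simp [idxN], by simp, by simp⟩
      | succ k =>
        simp only [idxN, beq_self_eq_true, if_true, List.length_cons] at hk ⊢
        obtain ⟨j, hj, hget, hje, hcnt⟩ := ih (s+1) k (by omega)
        exact ⟨j + 1, by simpa using hj, by simpa [Nat.add_assoc, Nat.add_comm 1] using hget,
          by simpa using hje, by simp [hcnt]⟩
    · simp only [idxN, beq_iff_eq, h, if_false] at hk ⊢
      obtain ⟨j, hj, hget, hje, hcnt⟩ := ih (s+1) k hk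
      refine ⟨j + 1, by simpa using hj, by simpa [Nat.add_assoc, Nat.add_comm 1] using hget,
        by simpa using hje, ?_⟩
      simp [List.count_cons, hcnt]
      intro he; exact h he

theorem nodup_idxN (xs : List String) (e : String) (s : Nat) : (idxN xs e s).Nodup := by
  induction xs generalizing s with
  | nil => simp [idxN]
  | cons x xs ih =>
    have hlb : ∀ i ∈ idxN xs e (s+1), s + 1 ≤ i := by
      intro i hi
      rw [mem_idxN] at hi
      obtain ⟨j, _, rfl, _⟩ := hi
      omega
    by_cases h : x == e
    · simp only [idxN, h, if_true, List.nodup_cons]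
      exact ⟨fun hmem => by have := hlb s hmem; omega, ih (s+1)⟩
    · simpa only [idxN, h, if_false] using ih (s+1)

theorem filter_enumerate_eq_idxN (xs : List String) (e : String) (s : Nat) :
    (((PySem.List.enumerate xs (s : Int)).filter (fun p => p.2 == e)).map (·.1))
      = (idxN xs e s).map (fun (j : Nat) => (j : Int)) := by
  induction xs generalizing s with
  | nil => simp [idxN, PySem.List.enumerate_nil]
  | cons x xs ih =>
    have h1 : ((s : Int) + 1) = ((s + 1 : Nat) : Int) := by push_cast; ring
    rw [PySem.List.enumerate_cons, List.filter_cons]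
    by_cases h : x == e
    · simp only [h, if_true, List.map_cons, idxN, h1, ih]
    · simp only [h, if_false, idxN, Bool.false_eq_true, h1, ih]

theorem scatter_length (ks : List Nat) (t : Int) (v : Int → String) (res : List String) :
    ((PySem.List.enumerate (ks.map (fun (j : Nat) => (j : Int))) t).foldl
      (fun r q => PySem.List.pySetD r q.2 (v q.1)) res).length = res.length := by
  induction ks generalizing t res with
  | nil => simp [PySem.List.enumerate_nil]
  | cons p ps ih =>
    simp only [List.map_cons, PySem.List.enumerate_cons, List.foldl_cons]
    rw [ih]
    simp [PySem.List.pySetD_natCast]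

theorem scatter_not_mem (ks : List Nat) (t : Int) (v : Int → String) (res : List String)
    (i : Nat) (hi : i ∉ ks) :
    ((PySem.List.enumerate (ks.map (fun (j : Nat) => (j : Int))) t).foldl
      (fun r q => PySem.List.pySetD r q.2 (v q.1)) res)[i]? = res[i]? := by
  induction ks generalizing t res with
  | nil => simp [PySem.List.enumerate_nil]
  | cons p ps ih =>
    simp only [List.map_cons, PySem.List.enumerate_cons, List.foldl_cons]
    rw [ih _ _ (fun h => hi (List.mem_cons_of_mem _ h))]
    simp only [PySem.List.pySetD_natCast]
    have hpi : p ≠ i := fun h => hi (h ▸ List.mem_cons_self)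
    rw [List.getElem?_set_ne hpi]

theorem scatter_get (ks : List Nat) (t : Int) (v : Int → String) (res : List String)
    (hnd : ks.Nodup) (k : Nat) (hk : k < ks.length) (hlt : ks[k] < res.length) :
    ((PySem.List.enumerate (ks.map (fun (j : Nat) => (j : Int))) t).foldl
      (fun r q => PySem.List.pySetD r q.2 (v q.1)) res)[ks[k]]? = some (v (t + k)) := by
  induction ks generalizing t res k with
  | nil => simp at hk
  | cons p ps ih =>
    simp only [List.map_cons, PySem.List.enumerate_cons, List.foldl_cons]
    cases k with
    | zero =>
      simp only [List.getElem_cons_zero] at hlt ⊢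
      rw [scatter_not_mem _ _ _ _ _ (List.nodup_cons.mp hnd).1]
      simp only [PySem.List.pySetD_natCast]
      rw [List.getElem?_set_self (by simpa using hlt)]
      simp
    | succ k =>
      simp only [List.getElem_cons_succ] at hlt ⊢
      have := ih (t+1) (PySem.List.pySetD res (p : Int) (v t)) (List.nodup_cons.mp hnd).2 k
        (by simpa using hk) (by simpa [PySem.List.pySetD_natCast] using hlt)
      rw [this]
      have harg : t + 1 + (k : Int) = t + ((k + 1 : Nat) : Int) := by push_cast; ring
      rw [harg]

-- what A's loop emits, given total counts cs and already-consumed prefix pre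
def outA (cs : PySem.Dict String Int) : List String → List String → List String
  | [], _ => []
  | e :: es, pre =>
      (if 1 < cs.getD e 0 then e ++ "#" ++ PySem.Int.toStr ((pre.count e : Int) + 1) else e)
        :: outA cs es (pre ++ [e])

theorem foldA_snd (cs : PySem.Dict String Int) (l : List String) :
    ∀ (pre : List String) (d : PySem.Dict String Int) (acc : List String),
      (∀ x, d.getD x 0 = (pre.count x : Int)) →
      (l.foldl
        (fun (st : PySem.Dict String Int × List String) entry =>
          let seen := st.1.modify entry 0 (· + 1)
          (seen,
            if 1 < cs.getD entry 0 then
              st.2 ++ [entry ++ "#" ++ PySem.Int.toStr (seen.getD entry 0)]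
            else
              st.2 ++ [entry]))
        (d, acc)).2 = acc ++ outA cs l pre := by
  induction l with
  | nil => intro pre d acc h; simp [outA]
  | cons e es ih =>
    intro pre d acc h
    simp only [List.foldl_cons]
    rw [ih (pre ++ [e]) _ _ ?_]
    · have hseen : (d.modify e 0 (· + 1)).getD e 0 = (pre.count e : Int) + 1 := by
        rw [PySem.Dict.getD_modify_self, h]
      simp only [outA, hseen]
      by_cases hc : 1 < cs.getD e 0 <;> simp [hc]
    · intro x
      rw [PySem.Dict.getD_modify]
      by_cases hx : x = e
      · subst hx; simp [h, List.count_append]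
      · rw [if_neg hx, h, List.count_append]
        have h0 : List.count x [e] = 0 := by
          simp [List.count_cons]; intro h2; exact hx h2.symm
        rw [h0]; simp

theorem outA_eq_tags (entries : List String) (l pre : List String)
    (hsplit : entries = pre ++ l) :
    outA (PySem.Dict.counter entries) l pre
      = (List.range l.length).map (fun k => tagAt entries (pre.length + k)) := by
  induction l generalizing pre with
  | nil => simp [outA]
  | cons e es ih =>
    have hget : entries.getD pre.length "" = e := by
      subst hsplit
      simp [List.getD_eq_getElem?_getD]
    have hcnt : 1 < PySem.Dict.getD (PySem.Dict.counter entries) e 0 ↔ 1 < entries.count e := by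
      rw [PySem.Dict.getD_counter]; exact_mod_cast Iff.rfl
    have htake : entries.take (pre.length + 1) = pre ++ [e] := by
      subst hsplit
      rw [List.take_length_add_append]
      simp
    have hhead :
        (if 1 < PySem.Dict.getD (PySem.Dict.counter entries) e 0 then
          e ++ "#" ++ PySem.Int.toStr ((pre.count e : Int) + 1) else e)
        = tagAt entries pre.length := by
      rw [tagAt]
      simp only [hget, htake]
      by_cases hc : 1 < entries.count e
      · rw [if_pos (hcnt.mpr hc), if_pos hc]
        have : (((pre ++ [e]).count e : Nat) : Int) = (pre.count e : Int) + 1 := by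
          simp [List.count_append]
        rw [this]
      · rw [if_neg (fun h => hc (hcnt.mp h)), if_neg hc]
    rw [outA, hhead, List.length_cons, List.range_succ_eq_map, List.map_cons, List.map_map]
    congr 1
    rw [ih (pre ++ [e]) (by simp [hsplit])]
    apply List.map_congr_left
    intro k _
    have harg : (pre ++ [e]).length + k = pre.length + (k + 1) := by
      simp; omega
    simp only [Function.comp, harg]

theorem positions_getD (entries : List String) (e : String) :
    ((PySem.List.enumerate entries 0).foldl
      (fun d pr => d.modify pr.2 ([] : List Int) (· ++ [pr.1])) PySem.Dict.empty).getD e []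
    = (idxN entries e 0).map (fun (j : Nat) => (j : Int)) := by
  have h1 : (PySem.List.enumerate entries 0).foldl
      (fun d pr => d.modify pr.2 ([] : List Int) (· ++ [pr.1])) PySem.Dict.empty
    = (((PySem.List.enumerate entries 0).map Prod.swap).foldl
      (fun d p => d.modify p.1 ([] : List Int) (· ++ [p.2])) PySem.Dict.empty) := by
    rw [List.foldl_map]
    rfl
  rw [h1, PySem.Dict.getD_foldl_modify_append, List.filter_map, List.map_map]
  have h2 : (((PySem.List.enumerate entries 0).filter ((fun p => p.1 == e) ∘ Prod.swap)).map ((·.2) ∘ Prod.swap))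
      = (((PySem.List.enumerate entries ((0:Nat) : Int)).filter (fun p => p.2 == e)).map (·.1)) := by
    norm_num [Function.comp_def]
  rw [h2, filter_enumerate_eq_idxN]
  simp [PySem.Dict.getD_empty]

theorem positions_keys (entries : List String) :
    ((PySem.List.enumerate entries 0).foldl
      (fun d pr => d.modify pr.2 ([] : List Int) (· ++ [pr.1])) PySem.Dict.empty).keys
    = PySem.Set.ofList entries := by
  rw [PySem.Dict.keys_foldl_modify_key]
  simp [PySem.List.map_snd_enumerate, PySem.Dict.keys_empty]
  rfl


-- A's output, characterised positionally
theorem portA_eq_tags (entries : List String) :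
    normalize_trace_entries entries
      = (List.range entries.length).map (fun j => tagAt entries j) := by
  unfold normalize_trace_entries
  rw [foldA_snd (PySem.Dict.counter entries) entries [] PySem.Dict.empty []
    (by intro x; simp [PySem.Dict.getD_empty])]
  rw [outA_eq_tags entries entries [] rfl]
  simp

-- one group's scatter step of B
def bodyE (entries : List String) (r : List String) (e : String) : List String :=
  let idxs := (idxN entries e 0).map (fun (j : Nat) => (j : Int))
  if idxs.length == 1 then PySem.List.pySetD r (idxs.getD 0 0) e
  else (PySem.List.enumerate idxs 0).foldl
    (fun r q => PySem.List.pySetD r q.2 (e ++ "#" ++ PySem.Int.toStr (q.1 + 1))) r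

theorem bodyE_length (entries : List String) (r : List String) (e : String) :
    (bodyE entries r e).length = r.length := by
  unfold bodyE
  by_cases h : ((idxN entries e 0).map (fun (j : Nat) => (j : Int))).length == 1
  · simp only [h, if_true, PySem.List.length_pySetD]
  · rw [if_neg (by simpa using h)]
    exact scatter_length (idxN entries e 0) 0 (fun c => e ++ "#" ++ PySem.Int.toStr (c + 1)) r

theorem bodyE_getElem? (entries : List String) (r : List String) (e : String)
    (hr : r.length = entries.length) (i : Nat) :
    (bodyE entries r e)[i]? =
      if entries.getD i "" = e ∧ i < entries.length then some (tagAt entries i) else r[i]? := by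
  unfold bodyE
  have hmem : ∀ j : Nat, j ∈ idxN entries e 0 ↔ j < entries.length ∧ entries.getD j "" = e := by
    intro j
    rw [mem_idxN]
    constructor
    · rintro ⟨j', hj', rfl, hje⟩; simpa using ⟨hj', hje⟩
    · rintro ⟨hj, hje⟩; exact ⟨j, hj, by omega, hje⟩
  by_cases hone : ((idxN entries e 0).map (fun (j : Nat) => (j : Int))).length == 1
  · -- single occurrence: count e = 1, idxN = [j]
    have hlen1 : (idxN entries e 0).length = 1 := by simpa using hone
    obtain ⟨j, hj⟩ := List.length_eq_one_iff.mp hlen1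
    have hcnt1 : entries.count e = 1 := by rw [← length_idxN entries e 0, hj]; rfl
    have hjmem : j ∈ idxN entries e 0 := by rw [hj]; exact List.mem_singleton.mpr rfl
    have hjlt : j < entries.length := ((hmem j).mp hjmem).1
    have hje : entries.getD j "" = e := ((hmem j).mp hjmem).2
    rw [if_pos hone, hj]
    simp only [List.map_cons, List.map_nil, List.getD_cons_zero, PySem.List.pySetD_natCast]
    by_cases hie : entries.getD i "" = e ∧ i < entries.length
    · have hij : i = j := by
        have := (hmem i).mpr ⟨hie.2, hie.1⟩
        rw [hj] at this
        exact List.mem_singleton.mp this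
      subst hij
      rw [List.getElem?_set_self (by omega), if_pos hie]
      have htag : tagAt entries i = e := by
        simp only [tagAt, hie.1, hcnt1]
        norm_num
      rw [htag]
    · have hij : i ≠ j := fun h => hie (h ▸ ⟨hje, hjlt⟩)
      rw [List.getElem?_set_ne (fun h => hij h.symm), if_neg hie]
  · -- several occurrences: scatter with the occurrence index
    have hne1 : (idxN entries e 0).length ≠ 1 := by simpa using hone
    rw [if_neg (by simpa using hone)]
    by_cases hie : entries.getD i "" = e ∧ i < entries.length
    · have himem : i ∈ idxN entries e 0 := (hmem i).mpr ⟨hie.2, hie.1⟩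
      obtain ⟨k, hk, hki⟩ := List.mem_iff_getElem.mp himem
      have hsc := scatter_get (idxN entries e 0) 0
        (fun c => e ++ "#" ++ PySem.Int.toStr (c + 1)) r (nodup_idxN entries e 0) k hk
        (by rw [hki, hr]; exact hie.2)
      rw [hki] at hsc
      rw [hsc, if_pos hie]
      obtain ⟨j, hjlt, hgj, hje, hcnt⟩ := idxN_get entries e 0 k hk
      have hji : j = i := by omega
      rw [hji] at hcnt
      have hcount : 1 < entries.count e := by
        rw [← length_idxN entries e 0]
        have : 1 ≤ (idxN entries e 0).length := by omega
        omega
      have htag : tagAt entries i = e ++ "#" ++ PySem.Int.toStr (((k + 1 : Nat) : Int)) := by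
        simp only [tagAt, hie.1]
        rw [if_pos hcount, hcnt]
      rw [htag]
      have harg : (0 : Int) + (k : Int) + 1 = ((k + 1 : Nat) : Int) := by push_cast; ring
      rw [← harg]
    · have hnmem : i ∉ idxN entries e 0 := fun h => hie ⟨((hmem i).mp h).2, ((hmem i).mp h).1⟩
      rw [scatter_not_mem (idxN entries e 0) 0
        (fun c => e ++ "#" ++ PySem.Int.toStr (c + 1)) r i hnmem, if_neg hie]

theorem foldBody (entries : List String) (E : List String) :
    ∀ (r : List String), r.length = entries.length →
      ((E.foldl (bodyE entries) r).length = entries.length ∧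
       ∀ i : Nat, (E.foldl (bodyE entries) r)[i]? =
         if entries.getD i "" ∈ E ∧ i < entries.length then some (tagAt entries i) else r[i]?) := by
  induction E with
  | nil => intro r hr; refine ⟨hr, fun i => ?_⟩; simp
  | cons a E ih =>
    intro r hr
    have hr' : (bodyE entries r a).length = entries.length := by
      rw [bodyE_length, hr]
    obtain ⟨hlen, hget⟩ := ih (bodyE entries r a) hr'
    refine ⟨by simpa using hlen, fun i => ?_⟩
    rw [List.foldl_cons, hget i, bodyE_getElem? entries r a hr i]
    by_cases h1 : entries.getD i "" ∈ E ∧ i < entries.length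
    · rw [if_pos h1, if_pos ⟨List.mem_cons_of_mem a h1.1, h1.2⟩]
    · rw [if_neg h1]
      by_cases h2 : entries.getD i "" = a ∧ i < entries.length
      · rw [if_pos h2, if_pos ⟨by rw [h2.1]; exact List.mem_cons_self, h2.2⟩]
      · rw [if_neg h2, if_neg (fun hc =>
          (List.mem_cons.mp hc.1).elim (fun h => h2 ⟨h, hc.2⟩) (fun h => h1 ⟨h, hc.2⟩))]

theorem altB_eq_fold (entries : List String) :
    normalize_trace_entries_alt entries
      = (PySem.Set.ofList entries).foldl (bodyE entries) (List.replicate entries.length "") := by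
  simp only [normalize_trace_entries_alt]
  have hnd : ((PySem.List.enumerate entries 0).foldl
      (fun d pr => d.modify pr.2 ([] : List Int) (· ++ [pr.1])) PySem.Dict.empty).keys.Nodup := by
    rw [positions_keys]; exact PySem.Set.nodup_ofList entries
  rw [PySem.Dict.items_eq_map_keys _ hnd [], positions_keys, List.foldl_map]
  congr 1
  funext r k
  rw [positions_getD]
  rfl

theorem portB_eq_tags (entries : List String) :
    normalize_trace_entries_alt entries
      = (List.range entries.length).map (fun j => tagAt entries j) := by
  rw [altB_eq_fold]
  obtain ⟨hlen, hget⟩ := foldBody entries (PySem.Set.ofList entries)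
    (List.replicate entries.length "") (by simp)
  apply List.ext_getElem?
  intro i
  rw [hget i]
  by_cases hi : i < entries.length
  · have hgd : entries.getD i "" = entries[i] := by
      rw [List.getD_eq_getElem?_getD, List.getElem?_eq_getElem hi]
      rfl
    have hmem : entries.getD i "" ∈ PySem.Set.ofList entries := by
      rw [PySem.Set.mem_ofList, hgd]
      exact List.getElem_mem hi
    rw [if_pos ⟨hmem, hi⟩, List.getElem?_map, List.getElem?_range hi]
    rfl
  · have h1 : ¬ (entries.getD i "" ∈ PySem.Set.ofList entries ∧ i < entries.length) :=
      fun h => hi h.2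
    rw [if_neg h1]
    rw [List.getElem?_eq_none (by simpa using hi), List.getElem?_eq_none (by simpa using hi)]

-- ===== VERDICT (by name: the statement is the Claim_ definition above) =====
theorem normalize_trace_entries_spec : Claim_equal_normalize_trace_entries := by
  intro entries _
  unfold Spec_normalize_trace_entries
  rw [portA_eq_tags, portB_eq_tags]
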